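-- pv_equiv track=rewrite | github.com/GeirOwe/adventOfCode | day2_2_2024.py | allIncreasing
-- ===== SOURCE A (Python) =====
-- def allIncreasing(nums):
--     def is_increasing(arr):
--         return all(arr[i] < arr[i+1] for i in range(len(arr) - 1))
--
--     # Check if the original list is increasing
--     if is_increasing(nums):
--         return True
--
--     # Try removing one number at a time
--     for i in range(len(nums)):
--         temp = nums[:i] + nums[i+1:]
--         if is_increasing(temp):
--             return True
--
--     return False
-- ===== SOURCE B (Python) =====
-- def allIncreasing(nums):
--     # One linear pass: find the first adjacent violation; the list can be fixed
--     # by deleting at most one element iff deleting either end of that violating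
--     # pair fixes it (deleting anything else leaves the violating pair adjacent).
--     def ok(arr):
--         return all(arr[k] < arr[k+1] for k in range(len(arr) - 1))
--     for i in range(len(nums) - 1):
--         if nums[i] >= nums[i+1]:
--             return ok(nums[:i] + nums[i+1:]) or ok(nums[:i+1] + nums[i+2:])
--     return True
-- ===== Notes on version B (the rewrite author's own statement) =====
-- stated objective: faster
-- what changed: Instead of testing every one-element deletion (n candidate sublists, each rescanned), B makes one linear pass to the first adjacent violation and tests only the two deletions that can repair it.
import Mathlib
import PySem

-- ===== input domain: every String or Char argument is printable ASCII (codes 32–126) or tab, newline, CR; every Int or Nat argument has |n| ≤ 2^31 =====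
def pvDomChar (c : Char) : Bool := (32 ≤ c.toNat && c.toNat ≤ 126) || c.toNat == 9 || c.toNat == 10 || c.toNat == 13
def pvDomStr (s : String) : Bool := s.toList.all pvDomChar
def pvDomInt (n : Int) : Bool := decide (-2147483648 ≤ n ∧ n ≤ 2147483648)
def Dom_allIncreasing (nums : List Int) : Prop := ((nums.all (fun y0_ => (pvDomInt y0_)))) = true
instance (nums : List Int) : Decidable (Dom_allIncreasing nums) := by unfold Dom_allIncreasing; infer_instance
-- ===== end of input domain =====

-- B replaces A's try-every-deletion scan (O(n^2)) by one linear pass to the first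
-- adjacent violation, testing only the two deletions that can repair it (O(n)).

-- ===== PORT A =====
-- helper is_increasing: all(arr[i] < arr[i+1] for i in range(len(arr) - 1))
def isIncreasing (arr : List Int) : Bool :=
  (PySem.List.pyRange 0 ((arr.length : Int) - 1) 1).all
    (fun i => decide (PySem.List.pyGetD arr i 0 < PySem.List.pyGetD arr (i + 1) 0))

def allIncreasing (nums : List Int) : Bool :=
  if isIncreasing nums then true
  else
    (PySem.List.pyRange 0 (nums.length : Int) 1).any
      (fun i => isIncreasing
        (PySem.List.slice nums none (some i) ++ PySem.List.slice nums (some (i + 1)) none))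

-- ===== PORT B =====
-- Source B's local helper ok has the same body as A's is_increasing, so it is shared here

-- the 'for i in range(len(nums) - 1)' loop with its early return
def altLoop (nums : List Int) (i : Nat) : Bool :=
  if _h : i + 1 < nums.length then
    if PySem.List.pyGetD nums ((i : Int) + 1) 0 ≤ PySem.List.pyGetD nums (i : Int) 0 then
      isIncreasing (PySem.List.slice nums none (some (i : Int)) ++
           PySem.List.slice nums (some ((i : Int) + 1)) none) ||
      isIncreasing (PySem.List.slice nums none (some ((i : Int) + 1)) ++
           PySem.List.slice nums (some ((i : Int) + 2)) none)
    else altLoop nums (i + 1)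
  else true
  termination_by nums.length - i

def allIncreasing_alt (nums : List Int) : Bool := altLoop nums 0

-- ===== PRECONDITION & SPEC =====
def Spec_allIncreasing (nums : List Int) (out : Bool) : Prop := out = allIncreasing_alt nums
instance (nums : List Int) (out : Bool) : Decidable (Spec_allIncreasing nums out) := by unfold Spec_allIncreasing; infer_instance

-- ===== CLAIM (what is proved, stated in full; the proofs are below) =====
def Claim_equal_allIncreasing : Prop := ∀ (nums : List Int), Dom_allIncreasing nums → Spec_allIncreasing nums (allIncreasing nums)

-- ===== LEMMAS AND PROOFS =====

-- strict increase, stated by index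
def Good (l : List Int) : Prop :=
  ∀ (i : Nat) (h : i + 1 < l.length), l[i]'(Nat.lt_of_succ_lt h) < l[i + 1]'h

-- the semantic target both programs compute
def P (nums : List Int) : Prop :=
  Good nums ∨ ∃ j < nums.length, Good (nums.eraseIdx j)

lemma incr_iff (arr : List Int) :
    ((PySem.List.pyRange 0 ((arr.length : Int) - 1) 1).all
      (fun i => decide (PySem.List.pyGetD arr i 0 < PySem.List.pyGetD arr (i + 1) 0))) = true
    ↔ Good arr := by
  rw [List.all_eq_true]
  constructor
  · intro hall i hi
    have := hall (i : Int) (by rw [PySem.List.mem_pyRange_one]; omega)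
    rw [decide_eq_true_iff,
        PySem.List.pyGetD_eq_getElem _ _ (by omega) (by omega),
        PySem.List.pyGetD_eq_getElem _ _ (by omega) (by omega)] at this
    have e1 : ((i : Int)).toNat = i := by omega
    have e2 : ((i : Int) + 1).toNat = i + 1 := by omega
    simp only [e1, e2] at this
    exact this
  · intro hg x hx
    rw [PySem.List.mem_pyRange_one] at hx
    rw [decide_eq_true_iff,
        PySem.List.pyGetD_eq_getElem _ _ (by omega) (by omega),
        PySem.List.pyGetD_eq_getElem _ _ (by omega) (by omega)]
    have e2 : (x + 1).toNat = x.toNat + 1 := by omega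
    simp only [e2]
    exact hg x.toNat (by omega)

lemma isIncr_iff (arr : List Int) : isIncreasing arr = true ↔ Good arr := incr_iff arr

-- nums[:j] + nums[j+1:] is eraseIdx
lemma rem_eq (nums : List Int) (j : Nat) :
    PySem.List.slice nums none (some (j : Int)) ++
      PySem.List.slice nums (some ((j : Int) + 1)) none = nums.eraseIdx j := by
  have e : ((j : Int) + 1) = ((j + 1 : Nat) : Int) := by push_cast; ring
  rw [e, PySem.List.slice_to_natCast, PySem.List.slice_from_natCast,
      List.eraseIdx_eq_take_drop_succ]

-- A's value characterised
lemma A_iff (nums : List Int) : allIncreasing nums = true ↔ P nums := by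
  unfold allIncreasing
  split_ifs with h
  · simp only [true_iff]
    exact Or.inl ((isIncr_iff nums).mp h)
  · rw [List.any_eq_true]
    constructor
    · rintro ⟨x, hx, hok⟩
      rw [PySem.List.mem_pyRange_one] at hx
      have e : x = ((x.toNat : Nat) : Int) := by omega
      rw [e, rem_eq, isIncr_iff] at hok
      exact Or.inr ⟨x.toNat, by omega, hok⟩
    · rintro (hg | ⟨j, hj, hg⟩)
      · exact absurd ((isIncr_iff nums).mpr hg) h
      · exact ⟨(j : Int), by rw [PySem.List.mem_pyRange_one]; omega,
          by rw [rem_eq, isIncr_iff]; exact hg⟩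

-- if deleting j repairs a violation at (i, i+1), then j is i or i+1
lemma viol_force (nums : List Int) (i j : Nat) (hi : i + 1 < nums.length)
    (hv : nums[i + 1]'hi ≤ nums[i]'(Nat.lt_of_succ_lt hi)) (hj : j < nums.length)
    (hg : Good (nums.eraseIdx j)) : j = i ∨ j = i + 1 := by
  by_contra hc
  push Not at hc
  have hlen : (nums.eraseIdx j).length = nums.length - 1 := by
    rw [List.length_eraseIdx]; simp [hj]
  rcases Nat.lt_or_ge j i with hlt | hge
  · obtain ⟨i', rfl⟩ : ∃ i', i = i' + 1 := ⟨i - 1, by omega⟩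
    have h2 : i' + 1 < (nums.eraseIdx j).length := by omega
    have := hg i' h2
    rw [List.getElem_eraseIdx, List.getElem_eraseIdx] at this
    rw [dif_neg (by omega), dif_neg (by omega)] at this
    omega
  · have hji : i + 1 < j := by omega
    have h2 : i + 1 < (nums.eraseIdx j).length := by omega
    have := hg i h2
    rw [List.getElem_eraseIdx, List.getElem_eraseIdx] at this
    rw [dif_pos (by omega), dif_pos (by omega)] at this
    omega

lemma altLoop_iff (nums : List Int) (n i : Nat) (hn : nums.length - i ≤ n)
    (hpre : ∀ k, k < i → (h : k + 1 < nums.length) →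
      nums[k]'(Nat.lt_of_succ_lt h) < nums[k + 1]'h) :
    (altLoop nums i = true ↔ P nums) := by
  induction n generalizing i with
  | zero =>
    rw [altLoop, dif_neg (by omega)]
    simp only [true_iff]
    exact Or.inl (fun k hk => hpre k (by omega) hk)
  | succ n ih =>
    rw [altLoop]
    by_cases h : i + 1 < nums.length
    · rw [dif_pos h]
      have ei : PySem.List.pyGetD nums (i : Int) 0 = nums[i]'(Nat.lt_of_succ_lt h) := by
        rw [PySem.List.pyGetD_eq_getElem _ _ (by omega) (by omega)]
        simp
      have ei1 : PySem.List.pyGetD nums ((i : Int) + 1) 0 = nums[i + 1]'h := by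
        rw [PySem.List.pyGetD_eq_getElem _ _ (by omega) (by omega)]
        have e2 : ((i : Int) + 1).toNat = i + 1 := by omega
        simp only [e2]
      by_cases hv : PySem.List.pyGetD nums ((i : Int) + 1) 0 ≤ PySem.List.pyGetD nums (i : Int) 0
      · rw [if_pos hv]
        rw [ei, ei1] at hv
        have e : ((i : Int) + 2) = ((i + 1 : Nat) : Int) + 1 := by push_cast; ring
        have e1 : ((i : Int) + 1) = ((i + 1 : Nat) : Int) := by push_cast; ring
        rw [Bool.or_eq_true, rem_eq, isIncr_iff]
        rw [e, e1, rem_eq, isIncr_iff]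
        constructor
        · rintro (hg | hg)
          · exact Or.inr ⟨i, by omega, hg⟩
          · exact Or.inr ⟨i + 1, by omega, hg⟩
        · rintro (hg | ⟨j, hj, hg⟩)
          · exact absurd (hg i h) (by omega)
          · rcases viol_force nums i j h hv hj hg with rfl | rfl
            · exact Or.inl hg
            · exact Or.inr hg
      · rw [if_neg hv]
        apply ih (i + 1) (by omega)
        intro k hk hklen
        rcases Nat.lt_or_ge k i with hki | hki
        · exact hpre k hki hklen
        · have : k = i := by omega
          subst this
          rw [ei, ei1] at hv
          omega
    · rw [dif_neg h]
      simp only [true_iff]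
      have hgood : Good nums := fun k hk => hpre k (by omega) hk
      exact Or.inl hgood

-- ===== VERDICT (by name: the statement is the Claim_ definition above) =====
theorem allIncreasing_spec : Claim_equal_allIncreasing := by
  intro nums _
  unfold Spec_allIncreasing allIncreasing_alt
  rw [Bool.eq_iff_iff, A_iff,
    altLoop_iff nums nums.length 0 (by omega) (by intro k hk; omega)]
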